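-- pv_equiv track=rewrite | github.com/lwy0ever/hackerrank | The Bomberman Game.py | bomberMan
-- ===== SOURCE A (Python) =====
-- def bomberMan(n, grid):
--     r = len(grid)
--     c = len(grid[0])
--     if n == 1:
--         return grid
--     if n % 2 == 0:
--         ngrid = ['O' * c for i in range(r)]
--         return ngrid
--     if n % 4 == 1:
--         loop = 2
--     if n % 4 == 3:
--         loop = 1
--     for l in range(loop):
--         ngrid = ['O' * c for i in range(r)]
--         for i in range(r):
--             for j in range(c):
--                 if grid[i][j] == 'O':
--                     if i - 1 >= 0:
--                         ngrid[i - 1] = ngrid[i- 1][:j] + '.' + ngrid[i - 1][j + 1:]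
--                     if i + 1 < r:
--                         ngrid[i + 1] = ngrid[i + 1][:j] + '.' + ngrid[i + 1][j + 1:]
--                     ngrid[i] = ngrid[i][:max(j - 1,0)] + '.' * (min(j + 2,c) - max(j - 1,0)) + ngrid[i][min(j + 2,c):]
--         grid = ngrid
--     return grid
-- ===== SOURCE B (Python) =====
-- def bomberMan(n, grid):
--     r = len(grid)
--     c = len(grid[0])
--     if n == 1:
--         return grid
--     if n % 2 == 0:
--         return ['O' * c for _ in range(r)]
--     steps = 2 if n % 4 == 1 else 1
--     for _ in range(steps):
--         grid = [''.join(
--             '.' if (grid[i][j] == 'O'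
--                     or (i > 0 and grid[i - 1][j] == 'O')
--                     or (i + 1 < r and grid[i + 1][j] == 'O')
--                     or (j > 0 and grid[i][j - 1] == 'O')
--                     or (j + 1 < c and grid[i][j + 1] == 'O'))
--             else 'O'
--             for j in range(c)) for i in range(r)]
--     return grid
-- ===== Notes on version B (the rewrite author's own statement) =====
-- stated objective: alternative
-- what changed: B computes each output cell directly from its own and neighbouring input cells (gather) in one comprehension, instead of building all-'O' rows and punching '.' holes per bomb via string slice-rebuilds (scatter).
import Mathlib
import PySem

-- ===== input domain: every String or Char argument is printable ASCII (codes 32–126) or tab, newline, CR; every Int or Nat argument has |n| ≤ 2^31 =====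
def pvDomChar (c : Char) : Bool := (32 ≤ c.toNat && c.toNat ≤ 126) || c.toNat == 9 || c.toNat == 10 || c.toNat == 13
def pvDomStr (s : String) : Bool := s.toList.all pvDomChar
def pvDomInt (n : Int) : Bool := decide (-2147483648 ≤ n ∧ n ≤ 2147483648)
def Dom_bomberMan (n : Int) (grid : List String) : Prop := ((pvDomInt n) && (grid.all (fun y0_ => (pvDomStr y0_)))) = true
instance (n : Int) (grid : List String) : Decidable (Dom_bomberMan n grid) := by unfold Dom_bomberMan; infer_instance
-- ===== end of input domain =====

-- B computes each output cell from its own and neighbouring input cells (gather)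
-- instead of punching '.' holes per bomb via string slice-rebuilds (scatter);
-- objective: alternative. Strings are ported through List Char.

-- ===== PORT A =====
-- ngrid[x][:j] + '.' + ngrid[x][j+1:]
def pvDotA (row : List Char) (j : Nat) : List Char :=
  PySem.List.slice row none (some (j : Int)) ++ ['.'] ++
  PySem.List.slice row (some ((j : Int) + 1)) none

-- ngrid[i][:max(j-1,0)] + '.'*(min(j+2,c)-max(j-1,0)) + ngrid[i][min(j+2,c):]
def pvMidA (row : List Char) (j c : Nat) : List Char :=
  let a : Int := max ((j : Int) - 1) 0
  let b : Int := min ((j : Int) + 2) (c : Int)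
  PySem.List.slice row none (some a) ++ List.replicate (b - a).toNat '.' ++
  PySem.List.slice row (some b) none

-- the body of A's inner loop: one bomb at (i, j) punches '.' into ngrid
def pvBody (r c : Nat) (g : List (List Char)) (i j : Nat) (ng : List (List Char)) : List (List Char) :=
  if (g.getD i []).getD j ' ' = 'O' then
    let ng1 := if 1 ≤ i then ng.set (i - 1) (pvDotA (ng.getD (i - 1) []) j) else ng
    let ng2 := if i + 1 < r then ng1.set (i + 1) (pvDotA (ng1.getD (i + 1) []) j) else ng1
    ng2.set i (pvMidA (ng2.getD i []) j c)
  else ng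

-- one pass of A's double loop over (i, j)
def pvStepA (r c : Nat) (g : List (List Char)) : List (List Char) :=
  (List.range r).foldl (fun ng i =>
    (List.range c).foldl (fun ng j => pvBody r c g i j ng) ng)
    ((List.range r).map (fun _ => List.replicate c 'O'))

def bomberMan (n : Int) (grid : List String) : List String :=
  let r := grid.length
  let c := (grid.headD "").toList.length
  if n = 1 then grid
  else if PySem.Int.mod n 2 = 0 then (List.range r).map (fun _ => String.ofList (List.replicate c 'O'))
  else
    let loop : Nat := if PySem.Int.mod n 4 = 1 then 2 else 1   -- n odd: n % 4 ∈ {1, 3}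
    ((List.range loop).foldl (fun g _ => pvStepA r c g) (grid.map String.toList)).map String.ofList

-- ===== PORT B =====
-- one pass: each output cell computed from its own and neighbouring input cells
def pvStepB (r c : Nat) (g : List (List Char)) : List (List Char) :=
  (List.range r).map (fun i => (List.range c).map (fun j =>
    if (g.getD i []).getD j ' ' = 'O'
       ∨ (0 < i ∧ (g.getD (i - 1) []).getD j ' ' = 'O')
       ∨ (i + 1 < r ∧ (g.getD (i + 1) []).getD j ' ' = 'O')
       ∨ (0 < j ∧ (g.getD i []).getD (j - 1) ' ' = 'O')
       ∨ (j + 1 < c ∧ (g.getD i []).getD (j + 1) ' ' = 'O')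
    then '.' else 'O'))

def bomberMan_alt (n : Int) (grid : List String) : List String :=
  let r := grid.length
  let c := (grid.headD "").toList.length
  if n = 1 then grid
  else if PySem.Int.mod n 2 = 0 then (List.range r).map (fun _ => String.ofList (List.replicate c 'O'))
  else
    let steps : Nat := if PySem.Int.mod n 4 = 1 then 2 else 1
    ((List.range steps).foldl (fun g _ => pvStepB r c g) (grid.map String.toList)).map String.ofList

-- ===== PRECONDITION & SPEC =====
-- Pre_ is exactly where Python A returns: a nonempty grid (len(grid[0]) raises IndexError
-- on []), and for odd n ≠ 1 every row at least as long as the first (grid[i][j] is read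
-- for all j < len(grid[0]) and raises IndexError on a shorter row).
def Pre_bomberMan (n : Int) (grid : List String) : Prop :=
  grid ≠ [] ∧ (n = 1 ∨ PySem.Int.mod n 2 = 0 ∨
    ∀ s ∈ grid, (grid.headD "").toList.length ≤ s.toList.length)
instance (n : Int) (grid : List String) : Decidable (Pre_bomberMan n grid) := by
  unfold Pre_bomberMan; infer_instance

def pvWitness_bomberMan : Int × List String := (3, ["O.O", "..."])

def Spec_bomberMan (n : Int) (grid : List String) (out : List String) : Prop := out = bomberMan_alt n grid
instance (n : Int) (grid : List String) (out : List String) : Decidable (Spec_bomberMan n grid out) := by unfold Spec_bomberMan; infer_instance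

-- ===== CLAIM (what is proved, stated in full; the proofs are below) =====
def Claim_equal_bomberMan : Prop := ∀ (n : Int) (grid : List String), Dom_bomberMan n grid → Pre_bomberMan n grid → Spec_bomberMan n grid (bomberMan n grid)

-- ===== LEMMAS AND PROOFS =====

-- a cell read with Python-out-of-range default
def pvCell (g : List (List Char)) (x y : Nat) : Char := (g.getD x []).getD y ' '

-- the set of cells a bomb at (i, j) dots in A's pass
abbrev pvAff (r i j x y : Nat) : Prop :=
  (x + 1 = i ∧ y = j) ∨ (x = i + 1 ∧ x < r ∧ y = j) ∨ (x = i ∧ j - 1 ≤ y ∧ y < j + 2)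

-- the grid-shape invariant of A's pass: r rows of length c
def pvInv (r c : Nat) (ng : List (List Char)) : Prop :=
  ng.length = r ∧ ∀ u, u < r → (ng.getD u []).length = c

theorem pv_rangeMap_getD {α : Type} (n : Nat) (f : Nat → α) (x : Nat) (d : α) :
    ((List.range n).map f).getD x d = if x < n then f x else d := by
  simp only [List.getD_eq_getElem?_getD, List.getElem?_map, List.getElem?_range]
  split_ifs <;> simp_all

theorem pv_paint_getD (row : List Char) (a b y : Nat) (hab : a ≤ b) (hb : b ≤ row.length) :
    (row.take a ++ List.replicate (b - a) '.' ++ row.drop b).getD y ' ' =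
      if a ≤ y ∧ y < b then '.' else row.getD y ' ' := by
  have ha : a ≤ row.length := le_trans hab hb
  simp only [List.getD_eq_getElem?_getD, List.getElem?_append, List.length_append,
    List.length_take, List.length_replicate, List.getElem?_take, List.getElem?_replicate,
    List.getElem?_drop]
  split_ifs <;> simp_all <;> try omega

theorem pvDotA_eq (row : List Char) (j : Nat) :
    pvDotA row j = row.take j ++ List.replicate 1 '.' ++ row.drop (j + 1) := by
  unfold pvDotA
  rw [PySem.List.slice_to_natCast]
  have : ((j : Int) + 1) = ((j + 1 : Nat) : Int) := by push_cast; ring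
  rw [this, PySem.List.slice_from_natCast]
  simp

theorem pvMidA_eq (row : List Char) (j c : Nat) :
    pvMidA row j c = row.take (j - 1) ++ List.replicate (min (j + 2) c - (j - 1)) '.' ++ row.drop (min (j + 2) c) := by
  show PySem.List.slice row none (some (max ((j : Int) - 1) 0)) ++
      List.replicate ((min ((j : Int) + 2) (c : Int)) - (max ((j : Int) - 1) 0)).toNat '.' ++
      PySem.List.slice row (some (min ((j : Int) + 2) (c : Int))) none = _
  have ha : max ((j : Int) - 1) 0 = ((j - 1 : Nat) : Int) := by omega
  have hb : min ((j : Int) + 2) (c : Int) = ((min (j + 2) c : Nat) : Int) := by omega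
  have hk : (((min (j + 2) c : Nat) : Int) - ((j - 1 : Nat) : Int)).toNat = min (j + 2) c - (j - 1) := by omega
  rw [ha, hb, PySem.List.slice_to_natCast, PySem.List.slice_from_natCast, hk]

theorem pv_getD_set (g : List (List Char)) (x u : Nat) (row : List Char) :
    (g.set x row).getD u [] = if u = x ∧ x < g.length then row else g.getD u [] := by
  simp only [List.getD_eq_getElem?_getD, List.getElem?_set]
  split_ifs <;> simp_all <;> omega

theorem pv_cell_set (g : List (List Char)) (x : Nat) (row : List Char) (u y : Nat) :
    pvCell (g.set x row) u y =
      if u = x ∧ x < g.length then row.getD y ' ' else pvCell g u y := by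
  unfold pvCell
  rw [pv_getD_set]
  split_ifs <;> rfl

theorem pv_dot_getD (row : List Char) (j y : Nat) (hj : j < row.length) :
    (pvDotA row j).getD y ' ' = if y = j then '.' else row.getD y ' ' := by
  have h := pv_paint_getD row j (j + 1) y (by omega) (by omega)
  rw [pvDotA_eq]
  simp only [Nat.add_sub_cancel_left] at h
  rw [h]
  split_ifs <;> simp_all <;> omega

theorem pv_dot_length (row : List Char) (j : Nat) (hj : j < row.length) :
    (pvDotA row j).length = row.length := by
  rw [pvDotA_eq]; simp; omega

theorem pv_mid_getD (row : List Char) (j c y : Nat) (hc : row.length = c) (hj : j < c) :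
    (pvMidA row j c).getD y ' ' = if j - 1 ≤ y ∧ y < min (j + 2) c then '.' else row.getD y ' ' := by
  rw [pvMidA_eq, pv_paint_getD row (j - 1) (min (j + 2) c) y (by omega) (by omega)]

theorem pv_mid_length (row : List Char) (j c : Nat) (hc : row.length = c) (hj : j < c) :
    (pvMidA row j c).length = row.length := by
  rw [pvMidA_eq]; simp; omega

theorem pv_set_inv (r c : Nat) (ng : List (List Char)) (t : Nat) (row : List Char)
    (hinv : pvInv r c ng) (hrow : row.length = c) : pvInv r c (ng.set t row) := by
  refine ⟨by simp [hinv.1], fun u hu => ?_⟩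
  rw [pv_getD_set]
  split_ifs with h
  · exact hrow
  · exact hinv.2 u hu

theorem pv_dotset_inv (r c : Nat) (ng : List (List Char)) (t j : Nat)
    (hinv : pvInv r c ng) (ht : t < r) (hj : j < c) :
    pvInv r c (ng.set t (pvDotA (ng.getD t []) j)) := by
  apply pv_set_inv r c ng t _ hinv
  rw [pv_dot_length _ _ (by rw [hinv.2 t ht]; exact hj), hinv.2 t ht]

theorem pv_dotset_cell (r c : Nat) (ng : List (List Char)) (t j x y : Nat)
    (hinv : pvInv r c ng) (ht : t < r) (hj : j < c) :
    pvCell (ng.set t (pvDotA (ng.getD t []) j)) x y =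
      if x = t ∧ y = j then '.' else pvCell ng x y := by
  rw [pv_cell_set]
  have hlt : t < ng.length := by rw [hinv.1]; exact ht
  have hjl : j < (ng.getD t []).length := by rw [hinv.2 t ht]; exact hj
  rw [pv_dot_getD _ _ _ hjl]
  unfold pvCell
  split_ifs <;> simp_all <;> omega
theorem pv_midset_inv (r c : Nat) (ng : List (List Char)) (i j : Nat)
    (hinv : pvInv r c ng) (hi : i < r) (hj : j < c) :
    pvInv r c (ng.set i (pvMidA (ng.getD i []) j c)) := by
  apply pv_set_inv r c ng i _ hinv
  rw [pv_mid_length _ _ _ (hinv.2 i hi) hj, hinv.2 i hi]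

theorem pv_midset_cell (r c : Nat) (ng : List (List Char)) (i j x y : Nat)
    (hinv : pvInv r c ng) (hi : i < r) (hj : j < c) (hy : y < c) :
    pvCell (ng.set i (pvMidA (ng.getD i []) j c)) x y =
      if x = i ∧ j - 1 ≤ y ∧ y < j + 2 then '.' else pvCell ng x y := by
  rw [pv_cell_set, pv_mid_getD _ _ _ _ (hinv.2 i hi) hj]
  have hlt : i < ng.length := by rw [hinv.1]; exact hi
  unfold pvCell
  split_ifs <;> simp_all <;> omega

theorem pv_body_inv (r c : Nat) (g ng : List (List Char)) (i j : Nat)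
    (hinv : pvInv r c ng) (hi : i < r) (hj : j < c) :
    pvInv r c (pvBody r c g i j ng) := by
  unfold pvBody
  split_ifs with hbomb h1 h2 h2
  · exact pv_midset_inv r c _ i j
      (pv_dotset_inv r c _ (i + 1) j (pv_dotset_inv r c ng (i - 1) j hinv (by omega) hj) (by omega) hj) hi hj
  · exact pv_midset_inv r c _ i j (pv_dotset_inv r c ng (i - 1) j hinv (by omega) hj) hi hj
  · exact pv_midset_inv r c _ i j (pv_dotset_inv r c ng (i + 1) j hinv (by omega) hj) hi hj
  · exact pv_midset_inv r c ng i j hinv hi hj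
  · exact hinv

theorem pv_body_cell (r c : Nat) (g ng : List (List Char)) (i j : Nat)
    (hinv : pvInv r c ng) (hi : i < r) (hj : j < c) (x y : Nat) (hy : y < c) :
    pvCell (pvBody r c g i j ng) x y =
      if pvCell g i j = 'O' ∧ pvAff r i j x y then '.' else pvCell ng x y := by
  unfold pvBody
  by_cases hbomb : (g.getD i []).getD j ' ' = 'O'
  · rw [if_pos hbomb]
    have hcond : (pvCell g i j = 'O' ∧ pvAff r i j x y) ↔ pvAff r i j x y :=
      ⟨And.right, fun h => ⟨hbomb, h⟩⟩
    simp only [hcond]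
    by_cases h1 : 1 ≤ i
    · by_cases h2 : i + 1 < r
      · rw [if_pos h1, if_pos h2]
        have inv1 := pv_dotset_inv r c ng (i - 1) j hinv (by omega) hj
        rw [pv_midset_cell r c _ i j x y
            (pv_dotset_inv r c _ (i + 1) j inv1 (by omega) hj) hi hj hy,
          pv_dotset_cell r c _ (i + 1) j x y inv1 (by omega) hj,
          pv_dotset_cell r c ng (i - 1) j x y hinv (by omega) hj]
        unfold pvAff
        split_ifs <;> first | rfl | omega
      · rw [if_pos h1, if_neg h2]
        rw [pv_midset_cell r c _ i j x y
            (pv_dotset_inv r c ng (i - 1) j hinv (by omega) hj) hi hj hy,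
          pv_dotset_cell r c ng (i - 1) j x y hinv (by omega) hj]
        unfold pvAff
        split_ifs <;> first | rfl | omega
    · by_cases h2 : i + 1 < r
      · rw [if_neg h1, if_pos h2]
        rw [pv_midset_cell r c _ i j x y
            (pv_dotset_inv r c ng (i + 1) j hinv (by omega) hj) hi hj hy,
          pv_dotset_cell r c ng (i + 1) j x y hinv (by omega) hj]
        unfold pvAff
        split_ifs <;> first | rfl | omega
      · rw [if_neg h1, if_neg h2]
        rw [pv_midset_cell r c ng i j x y hinv hi hj hy]
        unfold pvAff
        split_ifs <;> first | rfl | omega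
  · rw [if_neg hbomb, if_neg (fun h => hbomb h.1)]
theorem pv_inner (r c : Nat) (g ng : List (List Char)) (i : Nat)
    (hinv : pvInv r c ng) (hi : i < r) (k : Nat) (hk : k ≤ c) :
    pvInv r c ((List.range k).foldl (fun ng j => pvBody r c g i j ng) ng) ∧
    ∀ x y, y < c →
      pvCell ((List.range k).foldl (fun ng j => pvBody r c g i j ng) ng) x y =
        if (List.range k).any (fun j => decide (pvCell g i j = 'O' ∧ pvAff r i j x y)) then '.'
        else pvCell ng x y := by
  induction k with
  | zero =>
    simp only [List.range_zero, List.foldl_nil, List.any_nil]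
    exact ⟨hinv, fun x y hy => by simp⟩
  | succ k ih =>
    obtain ⟨ih1, ih2⟩ := ih (by omega)
    rw [List.range_succ]
    refine ⟨?_, ?_⟩
    · rw [List.foldl_append, List.foldl_cons, List.foldl_nil]
      exact pv_body_inv r c g _ i k ih1 hi (by omega)
    · intro x y hy
      rw [List.foldl_append, List.foldl_cons, List.foldl_nil,
        pv_body_cell r c g _ i k ih1 hi (by omega) x y hy, ih2 x y hy,
        List.any_append]
      simp only [List.any_cons, List.any_nil, Bool.or_false]
      by_cases hP : (pvCell g i k = 'O' ∧ pvAff r i k x y)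
      · rw [if_pos hP, if_pos (by simp only [Bool.or_eq_true, decide_eq_true_eq]; exact Or.inr hP)]
      · rw [if_neg hP]
        by_cases hA : ((List.range k).any fun j => decide (pvCell g i j = 'O' ∧ pvAff r i j x y)) = true
        · rw [if_pos hA, if_pos (by simp only [Bool.or_eq_true]; exact Or.inl hA)]
        · rw [if_neg hA, if_neg (by simp only [Bool.or_eq_true, decide_eq_true_eq]; exact fun h => h.elim hA hP)]

theorem pv_outer (r c : Nat) (g ng : List (List Char))
    (hinv : pvInv r c ng) (k : Nat) (hk : k ≤ r) :
    pvInv r c ((List.range k).foldl (fun ng i => (List.range c).foldl (fun ng j => pvBody r c g i j ng) ng) ng) ∧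
    ∀ x y, y < c →
      pvCell ((List.range k).foldl (fun ng i => (List.range c).foldl (fun ng j => pvBody r c g i j ng) ng) ng) x y =
        if (List.range k).any (fun i => (List.range c).any (fun j => decide (pvCell g i j = 'O' ∧ pvAff r i j x y))) then '.'
        else pvCell ng x y := by
  induction k with
  | zero =>
    simp only [List.range_zero, List.foldl_nil, List.any_nil]
    exact ⟨hinv, fun x y hy => by simp⟩
  | succ k ih =>
    obtain ⟨ih1, ih2⟩ := ih (by omega)
    rw [List.range_succ]
    refine ⟨?_, ?_⟩
    · rw [List.foldl_append, List.foldl_cons, List.foldl_nil]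
      exact (pv_inner r c g _ k ih1 (by omega) c le_rfl).1
    · intro x y hy
      rw [List.foldl_append, List.foldl_cons, List.foldl_nil,
        (pv_inner r c g _ k ih1 (by omega) c le_rfl).2 x y hy, ih2 x y hy,
        List.any_append]
      simp only [List.any_cons, List.any_nil, Bool.or_false]
      by_cases hC : ((List.range c).any fun j => decide (pvCell g k j = 'O' ∧ pvAff r k j x y)) = true
      · rw [if_pos hC, if_pos (by simp only [Bool.or_eq_true]; exact Or.inr hC)]
      · rw [if_neg hC]
        by_cases hA : ((List.range k).any fun i => (List.range c).any fun j => decide (pvCell g i j = 'O' ∧ pvAff r i j x y)) = true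
        · rw [if_pos hA, if_pos (by simp only [Bool.or_eq_true]; exact Or.inl hA)]
        · rw [if_neg hA, if_neg (by simp only [Bool.or_eq_true]; exact fun h => h.elim hA hC)]

theorem pv_init_inv (r c : Nat) : pvInv r c ((List.range r).map (fun _ => List.replicate c 'O')) := by
  refine ⟨by simp, fun u hu => ?_⟩
  rw [pv_rangeMap_getD, if_pos hu]
  simp

theorem pv_init_cell (r c x y : Nat) (hx : x < r) (hy : y < c) :
    pvCell ((List.range r).map (fun _ => List.replicate c 'O')) x y = 'O' := by
  unfold pvCell
  rw [pv_rangeMap_getD, if_pos hx]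
  simp [List.getD_eq_getElem?_getD, List.getElem?_replicate, hy]

theorem pv_stepA_inv (r c : Nat) (g : List (List Char)) : pvInv r c (pvStepA r c g) :=
  (pv_outer r c g _ (pv_init_inv r c) r le_rfl).1

theorem pv_stepA_cell (r c : Nat) (g : List (List Char)) (x y : Nat) (hx : x < r) (hy : y < c) :
    pvCell (pvStepA r c g) x y =
      if (List.range r).any (fun i => (List.range c).any (fun j => decide (pvCell g i j = 'O' ∧ pvAff r i j x y))) then '.'
      else 'O' := by
  unfold pvStepA
  rw [(pv_outer r c g _ (pv_init_inv r c) r le_rfl).2 x y hy, pv_init_cell r c x y hx hy]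

theorem pv_hit_iff (r c : Nat) (g : List (List Char)) (x y : Nat) (hx : x < r) (hy : y < c) :
    ((List.range r).any (fun i => (List.range c).any (fun j => decide (pvCell g i j = 'O' ∧ pvAff r i j x y))) = true) ↔
      (pvCell g x y = 'O'
       ∨ (0 < x ∧ pvCell g (x - 1) y = 'O')
       ∨ (x + 1 < r ∧ pvCell g (x + 1) y = 'O')
       ∨ (0 < y ∧ pvCell g x (y - 1) = 'O')
       ∨ (y + 1 < c ∧ pvCell g x (y + 1) = 'O')) := by
  simp only [List.any_eq_true, List.mem_range, decide_eq_true_eq]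
  constructor
  · rintro ⟨i, hi, j, hj, hO, haff⟩
    unfold pvAff at haff
    rcases haff with ⟨h1, rfl⟩ | ⟨rfl, hxr, rfl⟩ | ⟨rfl, h2, h3⟩
    · right; right; left
      refine ⟨by omega, ?_⟩
      rw [show x + 1 = i from h1]; exact hO
    · right; left
      exact ⟨by omega, by simpa using hO⟩
    · have hcase : j = y ∨ j = y + 1 ∨ y = j + 1 := by omega
      rcases hcase with rfl | rfl | h4
      · exact Or.inl hO
      · right; right; right; right; exact ⟨hj, hO⟩
      · right; right; right; left
        exact ⟨by omega, by rw [show y - 1 = j from by omega]; exact hO⟩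
  · rintro (h | ⟨h0, h⟩ | ⟨hxr, h⟩ | ⟨h0, h⟩ | ⟨hyc, h⟩)
    · exact ⟨x, hx, y, hy, h, Or.inr (Or.inr ⟨rfl, by omega, by omega⟩)⟩
    · exact ⟨x - 1, by omega, y, hy, h, Or.inr (Or.inl ⟨by omega, hx, rfl⟩)⟩
    · exact ⟨x + 1, hxr, y, hy, h, Or.inl ⟨rfl, rfl⟩⟩
    · exact ⟨x, hx, y - 1, by omega, h, Or.inr (Or.inr ⟨rfl, by omega, by omega⟩)⟩
    · exact ⟨x, hx, y + 1, hyc, h, Or.inr (Or.inr ⟨rfl, by omega, by omega⟩)⟩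

theorem pv_stepB_cell (r c : Nat) (g : List (List Char)) (x y : Nat) (hx : x < r) (hy : y < c) :
    pvCell (pvStepB r c g) x y =
      if (pvCell g x y = 'O'
          ∨ (0 < x ∧ pvCell g (x - 1) y = 'O')
          ∨ (x + 1 < r ∧ pvCell g (x + 1) y = 'O')
          ∨ (0 < y ∧ pvCell g x (y - 1) = 'O')
          ∨ (y + 1 < c ∧ pvCell g x (y + 1) = 'O')) then '.' else 'O' := by
  unfold pvStepB pvCell
  rw [pv_rangeMap_getD, if_pos hx, pv_rangeMap_getD, if_pos hy]

theorem pv_step_eq (r c : Nat) (g : List (List Char)) : pvStepA r c g = pvStepB r c g := by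
  have hlenA : (pvStepA r c g).length = r := (pv_stepA_inv r c g).1
  have hlenB : (pvStepB r c g).length = r := by unfold pvStepB; simp
  apply List.ext_getElem (by rw [hlenA, hlenB])
  intro x hx1 hx2
  have hxr : x < r := by omega
  have hrowA : (pvStepA r c g)[x].length = c := by
    rw [← List.getD_eq_getElem _ [] hx1]
    exact (pv_stepA_inv r c g).2 x hxr
  have hrowB : (pvStepB r c g)[x].length = c := by
    rw [← List.getD_eq_getElem _ [] hx2]
    unfold pvStepB
    rw [pv_rangeMap_getD, if_pos hxr]
    simp
  apply List.ext_getElem (by rw [hrowA, hrowB])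
  intro y hy1 hy2
  have hyc : y < c := by omega
  have eA : (pvStepA r c g)[x][y] = pvCell (pvStepA r c g) x y := by
    unfold pvCell
    rw [List.getD_eq_getElem _ [] hx1, List.getD_eq_getElem _ ' ' hy1]
  have eB : (pvStepB r c g)[x][y] = pvCell (pvStepB r c g) x y := by
    unfold pvCell
    rw [List.getD_eq_getElem _ [] hx2, List.getD_eq_getElem _ ' ' hy2]
  rw [eA, eB, pv_stepA_cell r c g x y hxr hyc, pv_stepB_cell r c g x y hxr hyc]
  have hiff := pv_hit_iff r c g x y hxr hyc
  split_ifs with hA hB hB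
  · rfl
  · exact absurd (hiff.mp hA) hB
  · exact absurd (hiff.mpr hB) hA
  · rfl

theorem pv_main (n : Int) (grid : List String) : bomberMan n grid = bomberMan_alt n grid := by
  unfold bomberMan bomberMan_alt
  split_ifs with h1 h2 h3
  · rfl
  · rfl
  · simp only [List.range_succ, List.range_zero, List.range_one, List.foldl_append,
      List.foldl_cons, List.foldl_nil, List.nil_append]
    rw [pv_step_eq, pv_step_eq]
  · simp only [List.range_one, List.foldl_cons, List.foldl_nil]
    rw [pv_step_eq]

-- ===== VERDICT (by name: the statement is the Claim_ definition above) =====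
theorem bomberMan_spec : Claim_equal_bomberMan := by
  intro n grid _ _
  unfold Spec_bomberMan
  exact pv_main n grid
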